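-- pv_equiv track=rewrite | github.com/eagerithm/Algorithms | bugoverdose/greedy/02.py | calculate
-- ===== SOURCE A (Python) =====
-- def calculate(name, target_list, abc_dic, abc_no_a):
--     answer = len(name) - 1
--     while target_list:
--         if any(item in target_list for item in list(abc_no_a)):
--             target = target_list.pop(0)
--             answer += abc_dic[target]
--         else:
--             answer -= len(target_list)
--             break
--     return answer
-- ===== SOURCE B (Python) =====
-- def calculate(name, target_list, abc_dic, abc_no_a):
--     marked = set(abc_no_a)
--     cut = 0
--     for i, t in enumerate(target_list):
--         if t in marked:
--             cut = i + 1
--     total = len(name) - 1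
--     for t in target_list[:cut]:
--         total += abc_dic[t]
--     return total - (len(target_list) - cut)
-- ===== Notes on version B (the rewrite author's own statement) =====
-- stated objective: faster
-- what changed: A rescans the whole remaining list for a marked element before every pop; B computes the cut point after the last marked element in one enumerate pass over set membership, then sums the prefix in a second single pass.
import Mathlib
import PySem

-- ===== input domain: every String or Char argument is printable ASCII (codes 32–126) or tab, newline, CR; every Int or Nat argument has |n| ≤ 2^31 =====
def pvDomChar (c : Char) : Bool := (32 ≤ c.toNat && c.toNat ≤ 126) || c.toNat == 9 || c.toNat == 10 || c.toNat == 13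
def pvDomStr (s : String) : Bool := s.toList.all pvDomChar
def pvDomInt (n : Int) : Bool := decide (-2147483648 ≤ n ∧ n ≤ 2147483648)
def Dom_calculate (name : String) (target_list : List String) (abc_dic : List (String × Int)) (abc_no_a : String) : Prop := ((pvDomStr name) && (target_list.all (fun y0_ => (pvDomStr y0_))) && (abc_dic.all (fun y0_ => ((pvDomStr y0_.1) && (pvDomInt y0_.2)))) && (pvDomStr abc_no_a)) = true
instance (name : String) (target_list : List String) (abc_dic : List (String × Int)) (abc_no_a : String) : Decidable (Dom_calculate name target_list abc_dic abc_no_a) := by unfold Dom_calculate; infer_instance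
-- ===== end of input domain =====

-- B replaces A's repeated 'any marked element still in the list' scan + pop loop by one pass that
-- finds the cut point after the last marked element, then a single prefix-sum pass (asymptotically faster).
-- Python A empties target_list in place (pop(0)); B leaves it untouched — the equivalence here is about the RETURN value only.

-- ===== PORT A =====
-- the while loop: pops the head while some character of abc_no_a is still present as an element;
-- abc_dic[target] is totalized with default 0 — the KeyError inputs are excluded by Pre_calculate.
def calcLoopA (abc_dic : List (String × Int)) (abc_no_a : String) : List String → Int → Int
  | [], answer => answer
  | t :: rest, answer =>
      if abc_no_a.toList.any (fun c => (t :: rest).contains (String.singleton c)) then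
        calcLoopA abc_dic abc_no_a rest (answer + PySem.Dict.getD (PySem.Dict.mk abc_dic) t 0)
      else
        answer - ((t :: rest).length : Int)

def calculate (name : String) (target_list : List String) (abc_dic : List (String × Int)) (abc_no_a : String) : Int :=
  calcLoopA abc_dic abc_no_a target_list (PySem.Str.len name - 1)

-- ===== PORT B =====
-- abc_dic[t] is totalized with default 0, as in port A; KeyError inputs are excluded by Pre_calculate.
def calculate_alt (name : String) (target_list : List String) (abc_dic : List (String × Int)) (abc_no_a : String) : Int :=
  let marked : PySem.Set String := PySem.Set.ofList (abc_no_a.toList.map (fun c => String.singleton c))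
  let cut : Int := (PySem.List.enumerate target_list).foldl
      (fun k p => if PySem.Set.contains marked p.2 then p.1 + 1 else k) 0
  let total : Int := (PySem.List.slice target_list none (some cut)).foldl
      (fun acc t => acc + PySem.Dict.getD (PySem.Dict.mk abc_dic) t 0) (PySem.Str.len name - 1)
  total - ((target_list.length : Int) - cut)

-- ===== PRECONDITION & SPEC =====
-- an element t of target_list is "marked" when it equals some single character of abc_no_a
def pvMarked (abc_no_a : String) (t : String) : Bool :=
  abc_no_a.toList.any (fun c => String.singleton c == t)

-- one past the index of the last marked element (0 if none): exactly the elements A pops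
def pvCut (abc_no_a : String) : List String → Nat
  | [] => 0
  | t :: rest =>
      let k := pvCut abc_no_a rest
      if k > 0 then k + 1 else if pvMarked abc_no_a t then 1 else 0

-- Pre_ excludes exactly the inputs where Python A raises KeyError: some popped element
-- (an element at or before the last marked one) is not a key of abc_dic.
def Pre_calculate (name : String) (target_list : List String) (abc_dic : List (String × Int)) (abc_no_a : String) : Prop :=
  ∀ t ∈ target_list.take (pvCut abc_no_a target_list), (PySem.Dict.get? (PySem.Dict.mk abc_dic) t).isSome = true

instance (name : String) (target_list : List String) (abc_dic : List (String × Int)) (abc_no_a : String) : Decidable (Pre_calculate name target_list abc_dic abc_no_a) := by unfold Pre_calculate; infer_instance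

def pvWitness_calculate : String × List String × (List (String × Int)) × String :=
  ("ab", ["x", "y"], [("x", 3), ("y", -2)], "y")

def Spec_calculate (name : String) (target_list : List String) (abc_dic : List (String × Int)) (abc_no_a : String) (out : Int) : Prop := out = calculate_alt name target_list abc_dic abc_no_a
instance (name : String) (target_list : List String) (abc_dic : List (String × Int)) (abc_no_a : String) (out : Int) : Decidable (Spec_calculate name target_list abc_dic abc_no_a out) := by unfold Spec_calculate; infer_instance

-- ===== CLAIM (what is proved, stated in full; the proofs are below) =====
def Claim_equal_calculate : Prop := ∀ (name : String) (target_list : List String) (abc_dic : List (String × Int)) (abc_no_a : String), Dom_calculate name target_list abc_dic abc_no_a → Pre_calculate name target_list abc_dic abc_no_a → Spec_calculate name target_list abc_dic abc_no_a (calculate name target_list abc_dic abc_no_a)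

-- ===== LEMMAS AND PROOFS =====

-- the per-iteration sum of the popped prefix
def pvSum (abc_dic : List (String × Int)) (l : List String) : Int :=
  (l.map (fun t => PySem.Dict.getD (PySem.Dict.mk abc_dic) t 0)).sum

lemma condA_eq (nn : String) (tl : List String) :
    (nn.toList.any fun c => tl.contains (String.singleton c)) = tl.any (pvMarked nn) := by
  rw [Bool.eq_iff_iff]
  simp only [List.any_eq_true, pvMarked, List.contains_iff_mem, beq_iff_eq]
  constructor
  · rintro ⟨c, hc, ht⟩; exact ⟨_, ht, c, hc, rfl⟩
  · rintro ⟨t, ht, c, hc, rfl⟩; exact ⟨c, hc, ht⟩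

lemma cut_pos_iff (nn : String) (tl : List String) :
    0 < pvCut nn tl ↔ tl.any (pvMarked nn) = true := by
  induction tl with
  | nil => simp [pvCut]
  | cons t rest ih =>
      simp only [pvCut, List.any_cons, Bool.or_eq_true]
      split_ifs with h1 h2 <;> simp_all

lemma cut_cons_of_any (nn : String) (t : String) (rest : List String)
    (h : (t :: rest).any (pvMarked nn) = true) :
    pvCut nn (t :: rest) = pvCut nn rest + 1 := by
  simp only [pvCut]
  split_ifs with h1 h2
  · rfl
  · omega
  · exfalso
    simp only [List.any_cons, Bool.or_eq_true] at h
    rcases h with h | h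
    · exact h2 h
    · exact absurd ((cut_pos_iff nn rest).mpr h) (by omega)

lemma cut_eq_zero_of_not_any (nn : String) (tl : List String)
    (h : ¬ tl.any (pvMarked nn) = true) : pvCut nn tl = 0 := by
  by_contra hne
  exact h ((cut_pos_iff nn tl).mp (Nat.pos_of_ne_zero hne))

-- closed form of A's while loop
lemma loopA_closed (dic : List (String × Int)) (nn : String) :
    ∀ (tl : List String) (ans : Int),
      calcLoopA dic nn tl ans
        = ans + pvSum dic (tl.take (pvCut nn tl)) - ((tl.length : Int) - (pvCut nn tl : Int)) := by
  intro tl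
  induction tl with
  | nil => intro ans; simp [calcLoopA, pvCut, pvSum]
  | cons t rest ih =>
      intro ans
      simp only [calcLoopA, condA_eq]
      by_cases h : (t :: rest).any (pvMarked nn) = true
      · rw [if_pos h, ih, cut_cons_of_any nn t rest h]
        simp only [List.take_succ_cons, pvSum, List.map_cons, List.sum_cons, List.length_cons]
        push_cast
        ring
      · rw [if_neg h, cut_eq_zero_of_not_any nn _ h]
        simp [pvSum]

-- closed form of B's enumerate fold, generalized over start index and accumulator
lemma foldB_enum (marked : PySem.Set String) (nn : String)
    (hm : ∀ t, PySem.Set.contains marked t = pvMarked nn t) :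
    ∀ (tl : List String) (i0 k0 : Int),
      (PySem.List.enumerate tl i0).foldl
          (fun k p => if PySem.Set.contains marked p.2 then p.1 + 1 else k) k0
        = if tl.any (pvMarked nn) then i0 + (pvCut nn tl : Int) else k0 := by
  intro tl
  induction tl with
  | nil => intro i0 k0; simp [PySem.List.enumerate_nil]
  | cons t rest ih =>
      intro i0 k0
      rw [PySem.List.enumerate_cons, List.foldl_cons, ih]
      dsimp only
      rw [hm]
      by_cases hr : rest.any (pvMarked nn) = true
      · have h : (t :: rest).any (pvMarked nn) = true := by simp [hr]
        rw [if_pos hr, if_pos h, cut_cons_of_any nn t rest h]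
        push_cast; ring
      · rw [if_neg hr]
        by_cases hm' : pvMarked nn t = true
        · have h : (t :: rest).any (pvMarked nn) = true := by simp [hm']
          rw [cut_cons_of_any nn t rest h, cut_eq_zero_of_not_any nn rest hr]
          simp [hm', h]
        · have h : ¬ (t :: rest).any (pvMarked nn) = true := by
            simp only [List.any_cons, Bool.or_eq_true]; tauto
          rw [if_neg hm', if_neg h]

lemma marked_contains (nn : String) (t : String) :
    PySem.Set.contains (PySem.Set.ofList (nn.toList.map (fun c => String.singleton c))) t
      = pvMarked nn t := by
  rw [Bool.eq_iff_iff, PySem.Set.contains_iff, PySem.Set.mem_ofList]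
  simp [List.mem_map, pvMarked, List.any_eq_true, beq_iff_eq]

theorem calculate_eq_alt (name : String) (tl : List String)
    (dic : List (String × Int)) (nn : String) :
    calculate name tl dic nn = calculate_alt name tl dic nn := by
  simp only [calculate, calculate_alt]
  rw [foldB_enum _ nn (marked_contains nn) tl 0 0]
  by_cases h : tl.any (pvMarked nn) = true
  · rw [if_pos h, loopA_closed]
    rw [zero_add, PySem.List.slice_to_natCast, PySem.List.foldl_add]
    simp [pvSum]
  · rw [if_neg h, loopA_closed, cut_eq_zero_of_not_any nn _ h]
    simp only [Int.natCast_zero, List.take_zero, pvSum, List.map_nil, List.sum_nil]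
    have : PySem.List.slice tl none (some (0 : Int)) = ([] : List String) := by
      simpa using PySem.List.slice_to_natCast tl 0
    rw [this]
    simp

-- ===== VERDICT (by name: the statement is the Claim_ definition above) =====
theorem calculate_spec : Claim_equal_calculate := by
  intro name tl dic nn _ _
  unfold Spec_calculate
  exact calculate_eq_alt name tl dic nn
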